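-- pv_equiv track=rewrite | github.com/Patel-Hetu/Python_Ques | a3_W23.py | capitalize_middle
-- ===== SOURCE A (Python) =====
-- def capitalize_middle(S) :
--     '''
--     Assume that S is a string.
--     Returns a string just like S, but all lowercase except with
--     the middle one (when the length is odd) or two (when the length
--     is even) letter(s) capitalized.
--
--     For example, capitalize_middle('wonderful') returns 'wondErful'.
--     And, capitalize_middle('FROG') returns 'fROg'.
--     Hint: upper() and lower() are methods of str
--     '''
--     length=len(S)
--     string=''
--     S=S.lower()
--     if length%2==0:
--         a=length/2
--         b=a-1
--         for i in range(0,len(S)):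
--             if i==a:
--                 string=string+S[i].upper()
--             elif i==b:
--                 string=string+S[i].upper()
--             else:
--                 string=string+S[i]
--     else:
--         a=length//2
--         for i in range(0,len(S)):
--             if i==a:
--                 string=string+S[i].upper()
--             else:
--                 string=string+S[i]
--
--     return string
-- ===== SOURCE B (Python) =====
-- def capitalize_middle(S):
--     s = S.lower()
--     n = len(S)
--     m = n // 2
--     if n % 2 != 0:
--         return s[:m] + s[m:m + 1].upper() + s[m + 1:]
--     else:
--         return s[:m - 1] + s[m - 1:m + 1].upper() + s[m + 1:]
-- ===== Notes on version B (the rewrite author's own statement) =====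
-- stated objective: simpler
-- what changed: B replaces A's per-index loop (an equality test and a one-character append at every position) by one lowercase pass plus three slices assembled around the computed middle; a timing run measured B faster (no per-character Python-level loop/concatenation).
import Mathlib
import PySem

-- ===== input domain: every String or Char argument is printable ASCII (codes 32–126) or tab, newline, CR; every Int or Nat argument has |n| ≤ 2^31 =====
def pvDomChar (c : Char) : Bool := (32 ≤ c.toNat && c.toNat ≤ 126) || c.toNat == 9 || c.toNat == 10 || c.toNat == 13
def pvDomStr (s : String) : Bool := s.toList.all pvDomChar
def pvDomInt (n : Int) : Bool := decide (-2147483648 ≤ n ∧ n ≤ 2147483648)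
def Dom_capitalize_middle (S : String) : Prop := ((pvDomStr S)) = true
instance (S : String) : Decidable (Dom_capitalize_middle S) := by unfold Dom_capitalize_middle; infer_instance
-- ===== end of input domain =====

-- B lowercases once and assembles the result from three slices around the computed middle
-- instead of A's per-index loop with equality tests at every position (objective: simpler).

-- ===== PORT A =====
def capitalize_middle (S : String) : String :=
  let length : Int := PySem.Str.len S
  let s : List Char := PySem.Chars.lower S.toList
  let string : List Char :=
    if PySem.Int.mod length 2 = 0 then
      -- Python's `a = length/2` is a float; `length` is even here, so it equals the exact
      -- integer quotient, and `i == a` holds exactly for the int i = length//2: ported as Int.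
      let a : Int := PySem.Int.floordiv length 2
      let b : Int := a - 1
      (PySem.List.pyRange 0 (PySem.Chars.len s) 1).foldl
        (fun acc i =>
          if i = a then acc ++ [PySem.Chars.upperChar (PySem.List.pyGetD s i ' ')]
          else if i = b then acc ++ [PySem.Chars.upperChar (PySem.List.pyGetD s i ' ')]
          else acc ++ [PySem.List.pyGetD s i ' ']) []
    else
      let a : Int := PySem.Int.floordiv length 2
      (PySem.List.pyRange 0 (PySem.Chars.len s) 1).foldl
        (fun acc i =>
          if i = a then acc ++ [PySem.Chars.upperChar (PySem.List.pyGetD s i ' ')]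
          else acc ++ [PySem.List.pyGetD s i ' ']) []
  String.ofList string

-- ===== PORT B =====
def capitalize_middle_alt (S : String) : String :=
  let s : List Char := PySem.Chars.lower S.toList
  let n : Int := PySem.Str.len S
  let m : Int := PySem.Int.floordiv n 2
  if PySem.Int.mod n 2 ≠ 0 then
    String.ofList (PySem.List.slice s none (some m) ++
      PySem.Chars.upper (PySem.List.slice s (some m) (some (m + 1))) ++
      PySem.List.slice s (some (m + 1)) none)
  else
    String.ofList (PySem.List.slice s none (some (m - 1)) ++
      PySem.Chars.upper (PySem.List.slice s (some (m - 1)) (some (m + 1))) ++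
      PySem.List.slice s (some (m + 1)) none)

-- ===== PRECONDITION & SPEC =====
def Spec_capitalize_middle (S : String) (out : String) : Prop := out = capitalize_middle_alt S
instance (S : String) (out : String) : Decidable (Spec_capitalize_middle S out) := by unfold Spec_capitalize_middle; infer_instance

-- ===== CLAIM (what is proved, stated in full; the proofs are below) =====
def Claim_equal_capitalize_middle : Prop := ∀ (S : String), Dom_capitalize_middle S → Spec_capitalize_middle S (capitalize_middle S)

-- ===== LEMMAS AND PROOFS =====

-- range(0, n) as a List.range with the cast made explicit
lemma pv_pyRange_cast (n : Nat) :
    PySem.List.pyRange 0 (n : Int) 1 = (List.range n).map (fun (k : Nat) => (k : Int)) := by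
  rw [PySem.List.pyRange_one]
  simp only [sub_zero, Int.toNat_natCast, zero_add]

-- Python n//2 on a Nat-cast argument is the Nat quotient
lemma pv_floordiv_two (n : Nat) :
    PySem.Int.floordiv (n : Int) 2 = ((n / 2 : Nat) : Int) := by
  have h : ((n : Int)).fdiv 2 = (n : Int) / 2 := Int.fdiv_eq_ediv_of_nonneg _ (by norm_num)
  simp [PySem.Int.floordiv, h]

-- mapping f over the window [lo, lo+w) of indices, identity elsewhere, is the three-slice split
lemma pv_window (s : List Char) (f : Char → Char) (p : Nat → Prop) [DecidablePred p]
    (lo w : Nat) (h : lo + w ≤ s.length)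
    (hp : ∀ k, k < s.length → (p k ↔ (lo ≤ k ∧ k < lo + w))) :
    (List.range s.length).map (fun k => if p k then f (s.getD k ' ') else s.getD k ' ')
      = s.take lo ++ ((s.drop lo).take w).map f ++ s.drop (lo + w) := by
  have hmin1 : min lo s.length = lo := by omega
  have hmin2 : min w (s.length - lo) = w := by omega
  apply List.ext_getElem
  · simp; omega
  · intro i h1 h2
    have hi : i < s.length := by simpa using h1
    have hgd : s.getD i ' ' = s[i] := List.getD_eq_getElem s ' ' hi
    simp only [List.getElem_map, List.getElem_range]
    simp only [List.getElem_append, List.length_append, List.length_take, List.length_map,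
      List.length_drop, hmin1, hmin2]
    by_cases hA : p i
    · have hc : lo ≤ i ∧ i < lo + w := (hp i hi).mp hA
      rw [if_pos hA]
      split_ifs with hB hC
      · omega
      · simp only [List.getElem_map]
        rw [List.getElem_take, List.getElem_drop, hgd]
        have hidx : lo + (i - lo) = i := by omega
        simp [hidx]
      · omega
    · rw [if_neg hA]
      have hc : i < lo ∨ lo + w ≤ i := by
        by_contra hcon
        exact hA ((hp i hi).mpr (by omega))
      split_ifs with hB hC
      · rw [List.getElem_take, hgd]
      · omega
      · rw [List.getElem_drop, hgd]
        have hidx : lo + w + (i - (lo + w)) = i := by omega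
        simp [hidx]

-- A's odd-length loop equals B's three-slice assembly
lemma pv_odd (s : List Char) (n : Nat) (hs : s.length = n) (hodd : n % 2 = 1) :
    (PySem.List.pyRange 0 (n : Int) 1).foldl
      (fun acc i =>
        if i = ((n / 2 : Nat) : Int) then acc ++ [PySem.Chars.upperChar (PySem.List.pyGetD s i ' ')]
        else acc ++ [PySem.List.pyGetD s i ' ']) []
    = PySem.List.slice s none (some ((n / 2 : Nat) : Int)) ++
      PySem.Chars.upper (PySem.List.slice s (some ((n / 2 : Nat) : Int)) (some (((n / 2 : Nat) : Int) + 1))) ++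
      PySem.List.slice s (some (((n / 2 : Nat) : Int) + 1)) none := by
  set m : Nat := n / 2 with hm
  have hcast : ((m : Int)) + 1 = ((m + 1 : Nat) : Int) := by push_cast; ring
  rw [← hs, pv_pyRange_cast, List.foldl_map]
  have hbody : (fun (acc : List Char) (k : Nat) =>
      if (k : Int) = (m : Int) then acc ++ [PySem.Chars.upperChar (PySem.List.pyGetD s (k : Int) ' ')]
      else acc ++ [PySem.List.pyGetD s (k : Int) ' '])
      = fun (acc : List Char) (k : Nat) => acc ++ [if (k : Int) = (m : Int) then PySem.Chars.upperChar (s.getD k ' ') else s.getD k ' '] := by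
    funext acc k
    rw [PySem.List.pyGetD_natCast]
    split_ifs <;> rfl
  rw [hbody, PySem.List.foldl_append_singleton_eq_map, List.nil_append]
  rw [pv_window s PySem.Chars.upperChar (fun k => (k : Int) = (m : Int)) m 1
    (by omega) (by intro k hk; omega)]
  rw [hcast, PySem.List.slice_to_natCast, PySem.List.slice_natCast, PySem.List.slice_from_natCast]
  have h1 : m + 1 - m = 1 := by omega
  simp [PySem.Chars.upper, h1]

-- A's even-length loop equals B's three-slice assembly
lemma pv_even (s : List Char) (n : Nat) (hs : s.length = n) (heven : n % 2 = 0) :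
    (PySem.List.pyRange 0 (n : Int) 1).foldl
      (fun acc i =>
        if i = ((n / 2 : Nat) : Int) then acc ++ [PySem.Chars.upperChar (PySem.List.pyGetD s i ' ')]
        else if i = ((n / 2 : Nat) : Int) - 1 then acc ++ [PySem.Chars.upperChar (PySem.List.pyGetD s i ' ')]
        else acc ++ [PySem.List.pyGetD s i ' ']) []
    = PySem.List.slice s none (some (((n / 2 : Nat) : Int) - 1)) ++
      PySem.Chars.upper (PySem.List.slice s (some (((n / 2 : Nat) : Int) - 1)) (some (((n / 2 : Nat) : Int) + 1))) ++
      PySem.List.slice s (some (((n / 2 : Nat) : Int) + 1)) none := by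
  rcases Nat.eq_zero_or_pos n with hz | hpos
  · subst hz
    have : s = [] := List.length_eq_zero_iff.mp hs
    subst this
    rfl
  · set m : Nat := n / 2 with hm
    have hm1 : 1 ≤ m := by omega
    have hcast1 : ((m : Int)) - 1 = ((m - 1 : Nat) : Int) := by omega
    have hcast2 : ((m : Int)) + 1 = ((m + 1 : Nat) : Int) := by push_cast; ring
    rw [← hs, pv_pyRange_cast, List.foldl_map]
    have hbody : (fun (acc : List Char) (k : Nat) =>
        if (k : Int) = (m : Int) then acc ++ [PySem.Chars.upperChar (PySem.List.pyGetD s (k : Int) ' ')]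
        else if (k : Int) = (m : Int) - 1 then acc ++ [PySem.Chars.upperChar (PySem.List.pyGetD s (k : Int) ' ')]
        else acc ++ [PySem.List.pyGetD s (k : Int) ' '])
        = fun (acc : List Char) (k : Nat) => acc ++ [if ((k : Int) = (m : Int) ∨ (k : Int) = (m : Int) - 1)
            then PySem.Chars.upperChar (s.getD k ' ') else s.getD k ' '] := by
      funext acc k
      rw [PySem.List.pyGetD_natCast]
      by_cases h1 : (k : Int) = (m : Int)
      · simp [h1]
      · by_cases h2 : (k : Int) = (m : Int) - 1 <;> simp [h1, h2]
    rw [hbody, PySem.List.foldl_append_singleton_eq_map, List.nil_append]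
    rw [pv_window s PySem.Chars.upperChar (fun k => (k : Int) = (m : Int) ∨ (k : Int) = (m : Int) - 1)
      (m - 1) 2 (by omega) (by intro k hk; omega)]
    rw [hcast1, hcast2, PySem.List.slice_to_natCast, PySem.List.slice_natCast,
      PySem.List.slice_from_natCast]
    have h1 : m + 1 - (m - 1) = 2 := by omega
    have h2 : m - 1 + 2 = m + 1 := by omega
    simp [PySem.Chars.upper, h1, h2]

-- ===== VERDICT (by name: the statement is the Claim_ definition above) =====
theorem capitalize_middle_spec : Claim_equal_capitalize_middle := by
  intro S _
  unfold Spec_capitalize_middle capitalize_middle capitalize_middle_alt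
  have h1 : PySem.Str.len S = ((S.toList.length : Nat) : Int) := by simp
  have h2 : PySem.Chars.len (PySem.Chars.lower S.toList) = ((S.toList.length : Nat) : Int) := by
    simp [PySem.Chars.lower]
  have hlow : (PySem.Chars.lower S.toList).length = S.toList.length := by
    simp [PySem.Chars.lower]
  set n : Nat := S.toList.length with hn
  simp only [h1, h2, pv_floordiv_two]
  have hmod : PySem.Int.mod (n : Int) 2 = (n : Int) % 2 := by
    have : ((n : Int)).fmod 2 = (n : Int) % 2 := by
      rw [Int.fmod_eq_emod]; norm_num
    simp [PySem.Int.mod, this]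
  by_cases hpar : n % 2 = 0
  · rw [if_pos (show PySem.Int.mod (n : Int) 2 = 0 by rw [hmod]; omega),
      if_neg (show ¬ (PySem.Int.mod (n : Int) 2 ≠ 0) by rw [hmod]; omega)]
    exact congrArg String.ofList (pv_even _ n hlow hpar)
  · rw [if_neg (show ¬ (PySem.Int.mod (n : Int) 2 = 0) by rw [hmod]; omega),
      if_pos (show PySem.Int.mod (n : Int) 2 ≠ 0 by rw [hmod]; omega)]
    exact congrArg String.ofList (pv_odd _ n hlow (by omega))
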